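-- pv_equiv track=rewrite | github.com/promptdriven/pdd | verify_root_cause.py | generate_test_file
-- ===== SOURCE A (Python) =====
-- def generate_test_file(num_lines: int) -> str:
--     """Generate a test file with placeholders."""
--     lines = []
--     for i in range(num_lines):
--         if i % 4 == 0:
--             lines.append(f"Module {i}: {{module_{i}}}")
--         else:
--             lines.append("Some description text here.")
--     return "\n".join(lines)
-- ===== SOURCE B (Python) =====
-- def generate_test_file(num_lines: int) -> str:
--     """Generate a test file with placeholders."""
--     description = "Some description text here."
--     parts = []
--     for start in range(0, num_lines, 4):
--         parts.append(f"Module {start}: {{module_{start}}}")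
--         parts.extend([description] * min(3, num_lines - start - 1))
--     return "\n".join(parts)
-- ===== Notes on version B (the rewrite author's own statement) =====
-- stated objective: alternative
-- what changed: Instead of A's per-line loop branching on a modulo test, B iterates block-wise over the stride range of header positions, emitting one module header followed by a replicated chunk of description lines per block.
import Mathlib
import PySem

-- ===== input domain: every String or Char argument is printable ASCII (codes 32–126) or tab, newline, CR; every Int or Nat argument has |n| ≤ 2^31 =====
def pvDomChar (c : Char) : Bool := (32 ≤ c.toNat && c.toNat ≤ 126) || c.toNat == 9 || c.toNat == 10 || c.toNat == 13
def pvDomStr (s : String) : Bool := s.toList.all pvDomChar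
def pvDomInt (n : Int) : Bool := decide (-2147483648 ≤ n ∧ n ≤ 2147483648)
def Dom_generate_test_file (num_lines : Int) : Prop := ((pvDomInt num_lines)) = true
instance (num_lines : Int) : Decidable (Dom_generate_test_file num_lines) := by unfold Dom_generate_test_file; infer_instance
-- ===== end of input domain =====

-- B replaces A's per-line loop with its modulo branch by a per-block loop over
-- range(0, num_lines, 4) that emits one module header plus a replicated chunk of
-- description lines per block (alternative decomposition, same O(n) cost).

-- ===== PORT A =====
-- literal port of A: one loop over range(num_lines), branching on i % 4 == 0
def generate_test_file (num_lines : Int) : String :=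
  let lines : List String :=
    (PySem.List.pyRange 0 num_lines 1).foldl
      (fun acc i =>
        if PySem.Int.mod i 4 == 0 then
          acc ++ ["Module " ++ PySem.Int.toStr i ++ ": {module_" ++ PySem.Int.toStr i ++ "}"]
        else
          acc ++ ["Some description text here."]) []
  PySem.Str.join "\n" lines

-- ===== PORT B =====
-- literal port of B: per block 'start' in range(0, num_lines, 4), append the header
-- line, then extend with min(3, num_lines - start - 1) copies of the description
def generate_test_file_alt (num_lines : Int) : String :=
  let description := "Some description text here."
  let parts : List String :=
    (PySem.List.pyRange 0 num_lines 4).foldl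
      (fun parts start =>
        (parts ++ ["Module " ++ PySem.Int.toStr start ++ ": {module_" ++ PySem.Int.toStr start ++ "}"])
          ++ List.replicate (min 3 (num_lines - start - 1)).toNat description) []
  PySem.Str.join "\n" parts

-- ===== PRECONDITION & SPEC =====
def Spec_generate_test_file (num_lines : Int) (out : String) : Prop := out = generate_test_file_alt num_lines
instance (num_lines : Int) (out : String) : Decidable (Spec_generate_test_file num_lines out) := by unfold Spec_generate_test_file; infer_instance

-- ===== CLAIM (what is proved, stated in full; the proofs are below) =====
def Claim_equal_generate_test_file : Prop := ∀ (num_lines : Int), Dom_generate_test_file num_lines → Spec_generate_test_file num_lines (generate_test_file num_lines)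

-- ===== LEMMAS AND PROOFS =====

-- flatMap respects pointwise equality on members
theorem pv_flatMap_congr {α β : Type} {f g : α → List β} (l : List α)
    (h : ∀ x ∈ l, f x = g x) : l.flatMap f = l.flatMap g := by
  induction l with
  | nil => rfl
  | cons a l ih =>
    simp only [List.flatMap_cons]
    rw [h a List.mem_cons_self, ih (fun x hx => h x (List.mem_cons_of_mem _ hx))]

-- one more line extends the stride-4 range iff the new index is a multiple of 4
theorem pv_R4_succ (m : Nat) :
    PySem.List.pyRange 0 ((m : Int) + 1) 4
      = PySem.List.pyRange 0 (m : Int) 4 ++ (if m % 4 = 0 then [(m : Int)] else []) := by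
  rw [PySem.List.pyRange_of_pos _ _ (show (0:Int) < 4 by norm_num),
      PySem.List.pyRange_of_pos _ _ (show (0:Int) < 4 by norm_num)]
  have h1 : (if (0 : Int) < (m : Int) + 1 then ((((m : Int) + 1) - 0 + 4 - 1) / 4).toNat else 0)
      = m / 4 + 1 := by split_ifs <;> omega
  rw [h1]
  by_cases hr : m % 4 = 0
  · have h0 : (if (0 : Int) < (m : Int) then (((m : Int) - 0 + 4 - 1) / 4).toNat else 0)
        = m / 4 := by split_ifs <;> omega
    rw [h0, if_pos hr, List.range_succ, List.map_append]
    congr 1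
    simp only [List.map_cons, List.map_nil]
    congr 1
    omega
  · have h0 : (if (0 : Int) < (m : Int) then (((m : Int) - 0 + 4 - 1) / 4).toNat else 0)
        = m / 4 + 1 := by split_ifs <;> omega
    rw [h0, if_neg hr, List.append_nil]

-- arithmetic characterisation of PySem.Int.mod on the loop's test
theorem pv_mod_true (m : Nat) (h : m % 4 = 0) : (PySem.Int.mod (m : Int) 4 == 0) = true := by
  simp [PySem.Int.mod, Int.fmod_eq_emod]; omega

theorem pv_mod_false (m : Nat) (h : ¬ m % 4 = 0) : (PySem.Int.mod (m : Int) 4 == 0) = false := by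
  simp [PySem.Int.mod, Int.fmod_eq_emod]; omega

-- core: the per-line branched list equals the per-block flatMap list
theorem pv_lines_eq_nat (m : Nat) :
    ((List.range m).map (fun (k : Nat) =>
        if PySem.Int.mod (k : Int) 4 == 0 then
          "Module " ++ PySem.Int.toStr (k : Int) ++ ": {module_" ++ PySem.Int.toStr (k : Int) ++ "}"
        else "Some description text here."))
      = (PySem.List.pyRange 0 (m : Int) 4).flatMap (fun s =>
          ("Module " ++ PySem.Int.toStr s ++ ": {module_" ++ PySem.Int.toStr s ++ "}")
            :: List.replicate (min 3 ((m : Int) - s - 1)).toNat "Some description text here.") := by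
  induction m with
  | zero => simp [PySem.List.pyRange_of_pos _ _ (show (0:Int) < 4 by norm_num)]
  | succ m ih =>
    have hmem : ∀ x : Int, x ∈ PySem.List.pyRange 0 (m : Int) 4 → 0 ≤ x ∧ x < m ∧ (4 : Int) ∣ x := by
      intro x hx
      have := (PySem.List.mem_pyRange_iff_of_pos (a := 0) (b := (m : Int)) (s := 4)
        (by norm_num) x).mp hx
      simpa using this
    rw [List.range_succ, List.map_append]
    push_cast
    rw [pv_R4_succ, List.flatMap_append]
    by_cases hr : m % 4 = 0
    · -- new line starts a new block; old blocks are all full (size 4), unchanged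
      have hcong : ∀ x ∈ PySem.List.pyRange 0 (m : Int) 4,
          (("Module " ++ PySem.Int.toStr x ++ ": {module_" ++ PySem.Int.toStr x ++ "}")
            :: List.replicate (min 3 ((m : Int) + 1 - x - 1)).toNat "Some description text here.")
          = (("Module " ++ PySem.Int.toStr x ++ ": {module_" ++ PySem.Int.toStr x ++ "}")
            :: List.replicate (min 3 ((m : Int) - x - 1)).toNat "Some description text here.") := by
        intro x hx
        obtain ⟨h0, h1, c, hc⟩ := hmem x hx
        have : x ≤ (m : Int) - 4 := by omega
        congr 2
        omega
      rw [pv_flatMap_congr _ hcong, ← ih]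
      congr 1
      rw [if_pos hr]
      simp only [List.map_cons, List.map_nil, List.flatMap_cons, List.flatMap_nil,
        List.append_nil, pv_mod_true m hr]
      have : (min 3 ((m : Int) + 1 - (m : Int) - 1)).toNat = 0 := by omega
      rw [this]
      simp
    · -- new line joins the last (partial) block: its replicate chunk grows by one
      rw [if_neg hr]
      simp only [List.flatMap_nil, List.append_nil, List.map_cons, List.map_nil,
        pv_mod_false m hr, Bool.false_eq_true, if_false]
      -- split the stride-4 range at its last element 4*(m/4)
      have hsplit : PySem.List.pyRange 0 (m : Int) 4
          = PySem.List.pyRange 0 ((4 * (m / 4) : Nat) : Int) 4 ++ [((4 * (m / 4) : Nat) : Int)] := by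
        rw [PySem.List.pyRange_of_pos _ _ (show (0:Int) < 4 by norm_num),
            PySem.List.pyRange_of_pos _ _ (show (0:Int) < 4 by norm_num)]
        have hA : (if (0 : Int) < (m : Int) then (((m : Int) - 0 + 4 - 1) / 4).toNat else 0)
            = m / 4 + 1 := by split_ifs <;> omega
        have hB : (if (0 : Int) < ((4 * (m / 4) : Nat) : Int)
              then ((((4 * (m / 4) : Nat) : Int) - 0 + 4 - 1) / 4).toNat else 0) = m / 4 := by
          split_ifs <;> omega
        rw [hA, hB, List.range_succ, List.map_append]
        congr 1
        simp only [List.map_cons, List.map_nil]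
        congr 1
        omega
      have hmem' : ∀ x : Int, x ∈ PySem.List.pyRange 0 ((4 * (m / 4) : Nat) : Int) 4 →
          0 ≤ x ∧ x < ((4 * (m / 4) : Nat) : Int) ∧ (4 : Int) ∣ x := by
        intro x hx
        have := (PySem.List.mem_pyRange_iff_of_pos
          (a := 0) (b := ((4 * (m / 4) : Nat) : Int)) (s := 4) (by norm_num) x).mp hx
        simpa using this
      -- blocks before the last one are full: their chunks do not change
      have hcong : ∀ x ∈ PySem.List.pyRange 0 ((4 * (m / 4) : Nat) : Int) 4,
          (("Module " ++ PySem.Int.toStr x ++ ": {module_" ++ PySem.Int.toStr x ++ "}")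
            :: List.replicate (min 3 ((m : Int) + 1 - x - 1)).toNat "Some description text here.")
          = (("Module " ++ PySem.Int.toStr x ++ ": {module_" ++ PySem.Int.toStr x ++ "}")
            :: List.replicate (min 3 ((m : Int) - x - 1)).toNat "Some description text here.") := by
        intro x hx
        obtain ⟨h0, h1, c, hc⟩ := hmem' x hx
        have : x ≤ ((4 * (m / 4) : Nat) : Int) - 4 := by omega
        congr 2
        omega
      -- the last block's chunk grows by exactly one description line
      have hk1 : (min 3 ((m : Int) + 1 - ((4 * (m / 4) : Nat) : Int) - 1)).toNat
          = (min 3 ((m : Int) - ((4 * (m / 4) : Nat) : Int) - 1)).toNat + 1 := by omega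
      have hlast : (("Module " ++ PySem.Int.toStr ((4 * (m / 4) : Nat) : Int) ++ ": {module_"
              ++ PySem.Int.toStr ((4 * (m / 4) : Nat) : Int) ++ "}")
            :: List.replicate (min 3 ((m : Int) + 1 - ((4 * (m / 4) : Nat) : Int) - 1)).toNat
              "Some description text here.")
          = (("Module " ++ PySem.Int.toStr ((4 * (m / 4) : Nat) : Int) ++ ": {module_"
              ++ PySem.Int.toStr ((4 * (m / 4) : Nat) : Int) ++ "}")
            :: List.replicate (min 3 ((m : Int) - ((4 * (m / 4) : Nat) : Int) - 1)).toNat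
              "Some description text here.") ++ ["Some description text here."] := by
        rw [hk1, List.replicate_succ']
        simp
      rw [hsplit, List.flatMap_append, pv_flatMap_congr _ hcong]
      simp only [List.flatMap_cons, List.flatMap_nil, List.append_nil]
      rw [hlast, ← List.append_assoc]
      congr 1
      rw [ih, hsplit, List.flatMap_append]
      simp

-- lift the core lemma to A's range over an Int bound
theorem pv_lines_eq_int (n : Int) (hn : 0 ≤ n) :
    ((PySem.List.pyRange 0 n 1).map (fun i =>
        if PySem.Int.mod i 4 == 0 then
          "Module " ++ PySem.Int.toStr i ++ ": {module_" ++ PySem.Int.toStr i ++ "}"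
        else "Some description text here."))
      = (PySem.List.pyRange 0 n 4).flatMap (fun s =>
          ("Module " ++ PySem.Int.toStr s ++ ": {module_" ++ PySem.Int.toStr s ++ "}")
            :: List.replicate (min 3 (n - s - 1)).toNat "Some description text here.") := by
  obtain ⟨m, rfl⟩ := Int.eq_ofNat_of_zero_le hn
  rw [PySem.List.pyRange_one, List.map_map]
  have := pv_lines_eq_nat m
  simp only [Int.sub_zero, Int.toNat_natCast]
  rw [← this]
  apply List.map_congr_left
  intro k _
  simp

-- ===== VERDICT (by name: the statement is the Claim_ definition above) =====
theorem generate_test_file_spec : Claim_equal_generate_test_file := by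
  intro n _
  unfold Spec_generate_test_file generate_test_file generate_test_file_alt
  have hbody : (fun (acc : List String) (i : Int) =>
      if PySem.Int.mod i 4 == 0 then
        acc ++ ["Module " ++ PySem.Int.toStr i ++ ": {module_" ++ PySem.Int.toStr i ++ "}"]
      else acc ++ ["Some description text here."])
      = fun acc i => acc ++ [if PySem.Int.mod i 4 == 0 then
          "Module " ++ PySem.Int.toStr i ++ ": {module_" ++ PySem.Int.toStr i ++ "}"
        else "Some description text here."] := by
    funext acc i; split <;> rfl
  have hbodyB : (fun (parts : List String) (start : Int) =>
      (parts ++ ["Module " ++ PySem.Int.toStr start ++ ": {module_" ++ PySem.Int.toStr start ++ "}"])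
        ++ List.replicate (min 3 (n - start - 1)).toNat "Some description text here.")
      = fun parts start => parts ++
          (("Module " ++ PySem.Int.toStr start ++ ": {module_" ++ PySem.Int.toStr start ++ "}")
            :: List.replicate (min 3 (n - start - 1)).toNat "Some description text here.") := by
    funext parts start; simp
  simp only [hbody, hbodyB, PySem.List.foldl_append_singleton_eq_map,
    PySem.List.foldl_append_eq_flatMap, List.nil_append]
  by_cases hn : 0 ≤ n
  · rw [pv_lines_eq_int n hn]
  · -- num_lines < 0: both loops run over an empty range
    rw [PySem.List.pyRange_one_eq_nil (by omega),
        PySem.List.pyRange_of_pos _ _ (show (0:Int) < 4 by norm_num)]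
    simp [show ¬ (0:Int) < n by omega]
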